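-- pv_equiv track=rewrite | github.com/tkgaolol/brushcode_juejin | code/98.py | solution
-- ===== SOURCE A (Python) =====
-- def solution(n, k, p):
--     # 计算第k次增殖后，第p个位置的数字
--
--     # 计算第k次增殖后序列的长度
--     def get_length(num, times):
--         if times == 0:
--             return 1
--         length = 0
--         for i in range(1, num + 1):
--             length += get_length(i, times - 1)
--         return length
--
--     # 递归找到第p个位置的数字
--     def find_number(num, times, pos):
--         # 如果不需要增殖，直接返回数字
--         if times == 0:
--             return num if pos == 1 else -1
--
--         # 计算当前位置之前的所有数字
--         current_pos = 0
--         for i in range(1, num + 1):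
--             # 计算当前数字i经过times-1次增殖后的长度
--             length = get_length(i, times - 1)
--
--             if current_pos + length >= pos:
--                 # 找到了包含目标位置的数字
--                 return find_number(i, times - 1, pos - current_pos)
--             current_pos += length
--
--         return -1
--
--     return find_number(n, k, p)
-- ===== SOURCE B (Python) =====
-- def solution(n, k, p):
--     # Closed form: after t proliferations, digit d expands to a block of length
--     # C(d+t-1, t).  Descend iteratively, keeping a running cumulative position and
--     # updating the block length in O(1) per digit (length *= (i+t); length //= i).
--     num, times, pos = n, k, p
--     while times > 0:
--         t = times - 1
--         cum = 0
--         length = 1          # C(1+t-1, t) = 1, block length of digit 1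
--         found = -1
--         for i in range(1, num + 1):
--             if cum + length >= pos:
--                 found = i
--                 break
--             cum += length
--             length = length * (i + t) // i   # C(i+t, t) from C(i+t-1, t), exact
--         if found == -1:
--             return -1
--         num, times, pos = found, times - 1, pos - cum
--     return num if times == 0 and pos == 1 else -1
-- ===== Notes on version B (the rewrite author's own statement) =====
-- stated objective: faster
-- what changed: B replaces A's exponential mutually recursive get_length computation by the closed form C(d+t-1,t) for a block's length, maintained by an O(1) multiplicative update along the scan, and descends iteratively instead of recursively.
import Mathlib
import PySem

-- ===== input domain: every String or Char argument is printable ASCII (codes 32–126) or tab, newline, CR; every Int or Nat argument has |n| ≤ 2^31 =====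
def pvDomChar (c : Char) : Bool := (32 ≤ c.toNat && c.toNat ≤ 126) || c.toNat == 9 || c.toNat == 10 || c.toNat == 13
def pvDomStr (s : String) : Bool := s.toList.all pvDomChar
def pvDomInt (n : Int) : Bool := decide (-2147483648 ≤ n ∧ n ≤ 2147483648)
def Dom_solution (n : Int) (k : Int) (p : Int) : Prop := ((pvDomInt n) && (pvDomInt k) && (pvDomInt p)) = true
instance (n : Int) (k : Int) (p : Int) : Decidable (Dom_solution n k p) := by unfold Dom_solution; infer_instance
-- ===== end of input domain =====

-- B replaces A's exponential recursive length computation by the closed form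
-- C(d+t-1, t) for a block length, kept up to date in O(1) per scanned digit,
-- and an iterative descent (objective: faster).

-- ===== PORT A =====
-- get_length(num, times): Python recurses on times; fuel bounds the depth (within Pre_ the
-- initial fuel k.toNat+1 always suffices, the fuel-0 branch is unreachable there).
def glA : Nat → Int → Int → Int
  | 0, _, times => if times = 0 then 1 else 0
  | f+1, num, times =>
      if times = 0 then 1
      else (PySem.List.pyRange 1 (num+1) 1).foldl (fun acc i => acc + glA f i (times-1)) 0

-- the for-loop of find_number with its early return: i runs over range(1, num+1) lazily
-- (stop = num+1), carrying current_pos; returns (i, current_pos) at the break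
def fnScan (f : Nat) (times pos stop i curpos : Int) : Option (Int × Int) :=
  if h : i < stop then
    (let len := glA f i (times - 1)
     if pos ≤ curpos + len then some (i, curpos)
     else fnScan f times pos stop (i+1) (curpos + len))
  else none
termination_by (stop - i).toNat
decreasing_by omega

def fnA : Nat → Int → Int → Int → Int
  | f, num, times, pos =>
    if times = 0 then (if pos = 1 then num else -1)
    else
      match f with
      | 0 => -1   -- unreachable within Pre_ (Python diverges only outside Pre_)
      | f+1 =>
        match fnScan f times pos (num+1) 1 0 with
        | none => -1
        | some (i, curpos) => fnA f i (times - 1) (pos - curpos)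

def solution (n : Int) (k : Int) (p : Int) : Int := fnA (k.toNat + 1) n k p

-- ===== PORT B =====
-- the for-loop over i in range(1, num+1) (lazily, stop = num+1) with the break,
-- carrying cum and the current block length; length * (i+t) // i is the O(1) update
def bScan (t pos stop i cum length : Int) : Option (Int × Int) :=
  if h : i < stop then
    (if pos ≤ cum + length then some (i, cum)
     else bScan t pos stop (i+1) (cum + length) (PySem.Int.floordiv (length * (i + t)) i))
  else none
termination_by (stop - i).toNat
decreasing_by omega

-- while times > 0: … (fuel = k.toNat is exactly the number of iterations the while performs)
def bDescend : Nat → Int → Int → Int → Int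
  | 0, num, times, pos => if times = 0 ∧ pos = 1 then num else -1
  | f+1, num, times, pos =>
      match bScan (times - 1) pos (num+1) 1 0 1 with
      | none => -1
      | some (i, cum) => bDescend f i (times - 1) (pos - cum)

def solution_alt (n : Int) (k : Int) (p : Int) : Int := bDescend k.toNat n k p

-- ===== PRECONDITION & SPEC =====
-- Pre_ excludes exactly k < 0 with n ≥ 1, where A's recursion never terminates (RecursionError).
def Pre_solution (n : Int) (k : Int) (p : Int) : Prop := 0 ≤ k ∨ n ≤ 0
instance (n : Int) (k : Int) (p : Int) : Decidable (Pre_solution n k p) := by unfold Pre_solution; infer_instance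
def pvWitness_solution : Int × Int × Int := (3, 2, 5)

def Spec_solution (n : Int) (k : Int) (p : Int) (out : Int) : Prop := out = solution_alt n k p
instance (n : Int) (k : Int) (p : Int) (out : Int) : Decidable (Spec_solution n k p out) := by unfold Spec_solution; infer_instance

-- ===== CLAIM (what is proved, stated in full; the proofs are below) =====
def Claim_equal_solution : Prop := ∀ (n : Int) (k : Int) (p : Int), Dom_solution n k p → Pre_solution n k p → Spec_solution n k p (solution n k p)

-- ===== LEMMAS AND PROOFS =====

-- the mathematical length of the block of digit i after t proliferations
def LenB : Nat → Int → Int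
  | 0, _ => 1
  | t+1, i => ((PySem.List.pyRange 1 (i+1) 1).map (LenB t)).sum

lemma glA_eq_LenB : ∀ (t f : Nat), t ≤ f → ∀ i : Int, glA f i (t : Int) = LenB t i := by
  intro t
  induction t with
  | zero => intro f _ i; cases f <;> simp [glA, LenB]
  | succ t ih =>
      intro f hf i
      obtain ⟨f', rfl⟩ : ∃ f', f = f' + 1 := ⟨f - 1, by omega⟩
      have ht : ((t+1 : Nat) : Int) ≠ 0 := by push_cast; omega
      have hsub : ((t+1 : Nat) : Int) - 1 = (t : Int) := by push_cast; ring
      simp only [glA, ht, if_false, hsub]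
      rw [PySem.List.foldl_add]
      simp only [LenB]
      rw [zero_add]
      congr 1
      apply List.map_congr_left
      intro x _
      exact ih f' (by omega) x

-- hockey stick: sum of C(l+t, t) over l < N is C(N+t, t+1)
lemma hockey (t : Nat) : ∀ N : Nat,
    ((List.range N).map (fun l => (l+t).choose t)).sum = (N+t).choose (t+1) := by
  intro N
  induction N with
  | zero => simp [Nat.choose_eq_zero_of_lt]
  | succ N ih =>
      rw [List.range_succ, List.map_append, List.sum_append]
      simp only [List.map_cons, List.map_nil, List.sum_cons, List.sum_nil, add_zero]
      rw [ih]
      have hp := Nat.choose_succ_succ (N+t) t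
      simp only [Nat.succ_eq_add_one] at hp
      rw [show N+1+t = (N+t)+1 by omega, hp]
      omega

lemma cast_list_sum (l : List Nat) : (((l.sum : Nat)) : Int) = (l.map (fun x : Nat => (x:Int))).sum := by
  induction l with
  | nil => simp
  | cons a s ih => simp [ih]

-- closed form for LenB
lemma LenB_choose (t : Nat) : ∀ a : Int, 1 ≤ a → LenB t a = (((a-1).toNat + t).choose t : Int) := by
  induction t with
  | zero => intro a _; simp [LenB]
  | succ t ih =>
      intro a ha
      simp only [LenB]
      rw [PySem.List.pyRange_one, show (a + 1 - 1).toNat = a.toNat by omega, List.map_map]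
      have hmap : (List.range a.toNat).map ((LenB t) ∘ (fun l : Nat => (1:Int) + l)) =
          (List.range a.toNat).map (fun l : Nat => (((l+t).choose t : Nat) : Int)) := by
        apply List.map_congr_left
        intro l _
        simp only [Function.comp]
        rw [ih (1 + (l:Int)) (by omega)]
        congr 2
        omega
      rw [hmap, show (List.range a.toNat).map (fun l : Nat => (((l+t).choose t : Nat) : Int)) =
            ((List.range a.toNat).map (fun l : Nat => (l+t).choose t)).map (fun x : Nat => (x:Int)) by
          rw [List.map_map]; rfl]
      rw [← cast_list_sum, hockey]
      congr 2
      omega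

lemma LenB_one (t : Nat) : LenB t 1 = 1 := by
  rw [LenB_choose t 1 le_rfl]
  simp

-- the O(1) length update of B is exact: from C(a-1+t, t) it reaches C(a+t, t)
lemma len_update (t : Nat) (a : Int) (ha : 1 ≤ a) :
    PySem.Int.floordiv (LenB t a * (a + (t:Int))) a = LenB t (a+1) := by
  have hmul : LenB t a * (a + (t:Int)) = LenB t (a+1) * a := by
    rw [LenB_choose t a ha, LenB_choose t (a+1) (by omega)]
    set N := (a-1).toNat with hNdef
    have hN : a = (N : Int) + 1 := by omega
    have h1 : ((a+1-1) : Int).toNat = N + 1 := by omega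
    rw [h1, hN]
    have hch := Nat.choose_mul_succ_eq (N+t) t
    rw [show (N+t+1) - t = N+1 by omega] at hch
    have hcast : ((N+t).choose t : Int) * ((N:Int) + (t:Int) + 1) = ((N+t+1).choose t : Int) * ((N:Int)+1) := by
      exact_mod_cast hch
    rw [show ((N:Int) + 1 + (t:Int)) = (N:Int) + (t:Int) + 1 by ring]
    rw [show N + 1 + t = N + t + 1 by omega]
    exact hcast
  rw [hmul]
  rw [(PySem.Int.floordiv_eq_iff_of_pos (by omega)).2 ⟨le_rfl, by nlinarith⟩]

lemma scan_eq (t : Nat) (pos num : Int) :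
    ∀ (c : Nat) (a curpos : Int), 1 ≤ a → (num + 1 - a).toNat = c →
      fnScan (t+1) ((t : Int) + 1) pos (num+1) a curpos =
        bScan (t : Int) pos (num+1) a curpos (LenB t a) := by
  intro c
  induction c with
  | zero =>
      intro a curpos h1 h2
      rw [fnScan, dif_neg (by omega), bScan, dif_neg (by omega)]
  | succ c ih =>
      intro a curpos h1 h2
      have hglA : glA (t+1) a (((t : Int) + 1) - 1) = LenB t a := by
        rw [show ((t : Int) + 1) - 1 = (t : Int) by ring]
        exact glA_eq_LenB t (t+1) (by omega) a
      rw [fnScan, dif_pos (by omega), bScan, dif_pos (by omega)]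
      simp only [hglA]
      by_cases hc : pos ≤ curpos + LenB t a
      · rw [if_pos hc, if_pos hc]
      · rw [if_neg hc, if_neg hc]
        rw [len_update t a h1]
        exact ih (a+1) (curpos + LenB t a) (by omega) (by omega)

lemma descend_eq :
    ∀ (t : Nat) (num pos : Int),
      fnA (t+1) num (t : Int) pos = bDescend t num (t : Int) pos := by
  intro t
  induction t with
  | zero => intro num pos; simp [fnA, bDescend]
  | succ t ih =>
      intro num pos
      have ht0 : ((t+1 : Nat) : Int) ≠ 0 := by push_cast; omega
      rw [show fnA (t+1+1) num ((t+1 : Nat) : Int) pos =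
            (match fnScan (t+1) ((t+1 : Nat) : Int) pos (num+1) 1 0 with
             | none => -1
             | some (i, curpos) => fnA (t+1) i (((t+1 : Nat) : Int) - 1) (pos - curpos))
          from by rw [fnA, if_neg ht0]]
      rw [show bDescend (t+1) num ((t+1 : Nat) : Int) pos =
            (match bScan (((t+1 : Nat) : Int) - 1) pos (num+1) 1 0 1 with
             | none => -1
             | some (i, cum) => bDescend t i (((t+1 : Nat) : Int) - 1) (pos - cum))
          from rfl]
      have hcast : ((t+1 : Nat) : Int) = (t : Int) + 1 := by push_cast; ring
      rw [hcast, show ((t : Int) + 1) - 1 = (t : Int) by ring]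
      have hs := scan_eq t pos num (num + 1 - 1).toNat 1 0 (by omega) rfl
      rw [LenB_one t] at hs
      rw [hs]
      cases hb : bScan (t : Int) pos (num+1) 1 0 1 with
      | none => rfl
      | some v =>
          obtain ⟨i, cum⟩ := v
          dsimp only
          exact ih i (pos - cum)

-- ===== VERDICT (by name: the statement is the Claim_ definition above) =====
theorem solution_spec : Claim_equal_solution := by
  unfold Claim_equal_solution
  intro n k p _ hpre
  unfold Spec_solution
  by_cases hk : 0 ≤ k
  · have hkk : ((k.toNat : Nat) : Int) = k := by omega
    unfold solution solution_alt
    rw [← hkk]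
    exact descend_eq k.toNat n p
  · have hkne : k ≠ 0 := by omega
    have hK : k.toNat = 0 := by omega
    unfold solution solution_alt
    rw [hK]
    rw [fnA, if_neg hkne]
    rw [fnScan, dif_neg (by rcases hpre with h | h; omega; omega)]
    simp [bDescend, hkne]
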